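-- pv_equiv track=rewrite | github.com/cltk/cltk | src/cltk/tokenizers/akk.py | tokenize_sign
-- ===== SOURCE A (Python) =====
-- def tokenize_sign(word: str):
--     """
--     Takes tuple (word, language) and splits the word up into individual
--     sign tuples (sign, language) in a list.
--
--     input: ("{gisz}isz-pur-ram", "akkadian")
--     output: [("gisz", "determinative"), ("isz", "akkadian"),
--     ("pur", "akkadian"), ("ram", "akkadian")]
--
--     :param: tuple created by word_tokenizer2
--     :return: list of tuples: (sign, function or language)
--     """
--     word_signs = []
--     sign = ""
--     language = word[1]
--     determinative = False
--     for char in word[0]: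
--         if determinative is True:
--             if char == "}":
--                 determinative = False
--                 if len(sign) > 0:  # pylint: disable=len-as-condition
--                     word_signs.append((sign, "determinative"))
--                 sign = ""
--                 language = word[1]
--                 continue
--             else:
--                 sign += char
--                 continue
--         else:
--             if language == "akkadian":
--                 if char == "{":
--                     if len(sign) > 0:  # pylint: disable=len-as-condition
--                         word_signs.append((sign, language))
--                     sign = ""
--                     determinative = True
--                     continue
--                 elif char == "_":
--                     if len(sign) > 0:  # pylint: disable=len-as-condition
--                         word_signs.append((sign, language))
--                     sign = ""
--                     language = "sumerian"
--                     continue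
--                 elif char == "-":
--                     if len(sign) > 0:  # pylint: disable=len-as-condition
--                         word_signs.append((sign, language))
--                     sign = ""
--                     language = word[1]  # or default word[1]?
--                     continue
--                 else:
--                     sign += char
--             elif language == "sumerian":
--                 if char == "{":
--                     if len(sign) > 0:  # pylint: disable=len-as-condition
--                         word_signs.append((sign, language))
--                     sign = ""
--                     determinative = True
--                     continue
--                 elif char == "_":
--                     if len(sign) > 0:  # pylint: disable=len-as-condition
--                         word_signs.append((sign, language))
--                     sign = ""
--                     language = word[1]
--                     continue
--                 elif char == "-":
--                     if len(sign) > 0:  # pylint: disable=len-as-condition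
--                         word_signs.append((sign, language))
--                     sign = ""
--                     language = word[1]
--                     continue
--                 else:
--                     sign += char
--     if len(sign) > 0:
--         word_signs.append((sign, language))
--
--     return word_signs
-- ===== SOURCE B (Python) =====
-- def tokenize_sign(word):
--     """Two-phase rewrite: first scan word[0] into structural tokens
--     (runs, '-'/'_' delimiters, complete or unclosed {...} determinatives),
--     then fold over the tokens with a current-language state."""
--     text, base = word
--     if base not in ("akkadian", "sumerian"):
--         return []
--     # phase 1: lexical scan
--     tokens = []
--     i = 0
--     n = len(text)
--     while i < n:
--         c = text[i]
--         if c == "{":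
--             j = text.find("}", i + 1)
--             if j == -1:
--                 tokens.append(("open", text[i + 1:]))
--                 i = n
--             else:
--                 tokens.append(("det", text[i + 1:j]))
--                 i = j + 1
--         elif c in "-_":
--             tokens.append((c, ""))
--             i += 1
--         else:
--             j = i
--             while j < n and text[j] not in "-_{":
--                 j += 1
--             tokens.append(("run", text[i:j]))
--             i = j
--     # phase 2: fold with language state
--     out = []
--     language = base
--     for kind, s in tokens:
--         if kind == "run":
--             out.append((s, language))
--         elif kind == "-":
--             language = base
--         elif kind == "_":
--             language = "sumerian" if language == "akkadian" else base
--         elif kind == "det":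
--             if s:
--                 out.append((s, "determinative"))
--             language = base
--         else:  # unclosed "{...": trailing text keeps the current language
--             if s:
--                 out.append((s, language))
--     return out
-- ===== Notes on version B (the rewrite author's own statement) =====
-- stated objective: faster
-- what changed: A is a single character-by-character state machine with a mutable sign buffer and determinative flag; B first lexes the word into structural tokens (runs, delimiters, complete/unclosed determinatives) using bulk find/slice operations, then folds over the short token list with only a language state.
import Mathlib
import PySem

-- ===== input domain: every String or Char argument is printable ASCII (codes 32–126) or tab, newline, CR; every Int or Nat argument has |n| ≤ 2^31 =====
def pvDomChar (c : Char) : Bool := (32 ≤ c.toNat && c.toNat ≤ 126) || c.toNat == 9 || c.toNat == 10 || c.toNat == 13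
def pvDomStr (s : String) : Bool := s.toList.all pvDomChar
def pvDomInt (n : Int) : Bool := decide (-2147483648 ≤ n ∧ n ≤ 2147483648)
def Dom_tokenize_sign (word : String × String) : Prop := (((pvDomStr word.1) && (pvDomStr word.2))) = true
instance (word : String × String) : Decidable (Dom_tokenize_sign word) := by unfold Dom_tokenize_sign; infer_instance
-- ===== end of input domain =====

-- B replaces A's one-pass char state machine by a two-phase scan (bulk find/slice into tokens) + fold over the tokens; measurably faster by constant factor.


-- ===== PORT A =====
-- literal transliteration of A's for-loop: state = (acc, sign buffer, language, determinative flag)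
def tokenize_sign_loopA (base : String) : List Char → List (String × String) →
    List Char → String → Bool → List (String × String)
  | [], acc, sign, language, _ =>
      if sign.length > 0 then acc ++ [(String.ofList sign, language)] else acc
  | c :: rest, acc, sign, language, det =>
      if det then
        if c = '}' then
          tokenize_sign_loopA base rest
            (if sign.length > 0 then acc ++ [(String.ofList sign, "determinative")] else acc)
            [] base false
        else
          tokenize_sign_loopA base rest acc (sign ++ [c]) language true
      else
        if language = "akkadian" then
          if c = '{' then
            tokenize_sign_loopA base rest
              (if sign.length > 0 then acc ++ [(String.ofList sign, language)] else acc)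
              [] language true
          else if c = '_' then
            tokenize_sign_loopA base rest
              (if sign.length > 0 then acc ++ [(String.ofList sign, language)] else acc)
              [] "sumerian" false
          else if c = '-' then
            tokenize_sign_loopA base rest
              (if sign.length > 0 then acc ++ [(String.ofList sign, language)] else acc)
              [] base false
          else
            tokenize_sign_loopA base rest acc (sign ++ [c]) language false
        else if language = "sumerian" then
          if c = '{' then
            tokenize_sign_loopA base rest
              (if sign.length > 0 then acc ++ [(String.ofList sign, language)] else acc)
              [] language true
          else if c = '_' then
            tokenize_sign_loopA base rest
              (if sign.length > 0 then acc ++ [(String.ofList sign, language)] else acc)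
              [] base false
          else if c = '-' then
            tokenize_sign_loopA base rest
              (if sign.length > 0 then acc ++ [(String.ofList sign, language)] else acc)
              [] base false
          else
            tokenize_sign_loopA base rest acc (sign ++ [c]) language false
        else
          tokenize_sign_loopA base rest acc sign language false

def tokenize_sign (word : String × String) : List (String × String) :=
  tokenize_sign_loopA word.2 word.1.toList [] [] word.2 false

-- ===== PORT B =====
-- tokens of B's phase 1 (Source B's ("run",s) / ("-","") / ("_","") / ("det",s) / ("open",s))
inductive PvTok
  | run : List Char → PvTok
  | dash : PvTok
  | under : PvTok
  | det : List Char → PvTok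
  | opn : List Char → PvTok
deriving DecidableEq, Repr

-- Source B's "not in \"-_{\"" test for run characters
def pvND (c : Char) : Bool := !(c = '-' || c = '_' || c = '{')

-- phase 1: Source B's index-based while loop (text.find('}') / slices) rendered as the
-- same scan on the char list: takeWhile/dropWhile are exactly the find+slice pair.
def pvScan : List Char → List PvTok
  | [] => []
  | c :: rest =>
      if c = '{' then
        match h : rest.dropWhile (· ≠ '}') with
        | [] => [PvTok.opn (rest.takeWhile (· ≠ '}'))]
        | _ :: r' => PvTok.det (rest.takeWhile (· ≠ '}')) :: pvScan r'
      else if c = '-' then PvTok.dash :: pvScan rest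
      else if c = '_' then PvTok.under :: pvScan rest
      else PvTok.run (c :: rest.takeWhile pvND) :: pvScan (rest.dropWhile pvND)
termination_by cs => cs.length
decreasing_by
  all_goals first
    | (have h1 := List.length_dropWhile_le (p := (· ≠ '}')) (l := rest)
       simp only [h] at h1
       simp only [List.length_cons] at *
       omega)
    | (have h1 := List.length_dropWhile_le (p := pvND) (l := rest)
       simp only [List.length_cons]
       omega)
    | (simp only [List.length_cons]; omega)

-- phase 2: Source B's for-loop over tokens with language state
def pvEmit (base : String) : List PvTok → String → List (String × String)
  | [], _ => []
  | PvTok.run s :: ts, language => (String.ofList s, language) :: pvEmit base ts language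
  | PvTok.dash :: ts, _ => pvEmit base ts base
  | PvTok.under :: ts, language =>
      pvEmit base ts (if language = "akkadian" then "sumerian" else base)
  | PvTok.det s :: ts, _ =>
      (if s = [] then [] else [(String.ofList s, "determinative")]) ++ pvEmit base ts base
  | PvTok.opn s :: ts, language =>
      (if s = [] then [] else [(String.ofList s, language)]) ++ pvEmit base ts language

def tokenize_sign_alt (word : String × String) : List (String × String) :=
  if word.2 = "akkadian" || word.2 = "sumerian" then
    pvEmit word.2 (pvScan word.1.toList) word.2
  else []

-- ===== PRECONDITION & SPEC =====
def Spec_tokenize_sign (word : String × String) (out : List (String × String)) : Prop := out = tokenize_sign_alt word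
instance (word : String × String) (out : List (String × String)) : Decidable (Spec_tokenize_sign word out) := by unfold Spec_tokenize_sign; infer_instance

-- ===== CLAIM (what is proved, stated in full; the proofs are below) =====
def Claim_equal_tokenize_sign : Prop := ∀ (word : String × String), Dom_tokenize_sign word → Spec_tokenize_sign word (tokenize_sign word)

-- ===== LEMMAS AND PROOFS =====

-- prepend a pending sign buffer to B's token list (merges with a leading run)
def pvCons (sign : List Char) (ts : List PvTok) : List PvTok :=
  if sign = [] then ts else
    match ts with
    | PvTok.run s :: ts' => PvTok.run (sign ++ s) :: ts'
    | _ => PvTok.run sign :: ts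

lemma pvCons_append (s : List Char) (c : Char) (ts : List PvTok) :
    pvCons (s ++ [c]) ts = pvCons s (pvCons [c] ts) := by
  cases s with
  | nil => simp [pvCons]
  | cons a s' =>
    cases ts with
    | nil => simp [pvCons]
    | cons t ts' => cases t <;> simp [pvCons]

lemma pvScan_cons_nd (c : Char) (cs : List Char) (hc : pvND c = true) :
    pvScan (c :: cs) = pvCons [c] (pvScan cs) := by
  have hc1 : ¬ c = '{' := by intro h; rw [h] at hc; simp [pvND] at hc
  have hc2 : ¬ c = '-' := by intro h; rw [h] at hc; simp [pvND] at hc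
  have hc3 : ¬ c = '_' := by intro h; rw [h] at hc; simp [pvND] at hc
  cases cs with
  | nil => simp [pvScan, pvCons, hc1, hc2, hc3]
  | cons d cs' =>
    by_cases hd1 : d = '{'
    · rw [pvScan, pvScan]
      simp only [hc1, hc2, hc3, hd1, if_false, if_true, if_pos, if_neg, not_false_iff]
      have : List.takeWhile pvND ('{' :: cs') = [] := by simp [List.takeWhile, pvND]
      have hdrop : List.dropWhile pvND ('{' :: cs') = '{' :: cs' := by simp [List.dropWhile, pvND]
      rw [this, hdrop, pvScan]
      simp only [if_pos rfl]
      cases h : List.dropWhile (fun x => x ≠ '}') cs' <;> simp [pvCons]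
    · by_cases hd2 : d = '-'
      · rw [pvScan, pvScan]
        simp [hc1, hc2, hc3, hd1, hd2, pvCons, List.takeWhile, List.dropWhile, pvND, pvScan]
      · by_cases hd3 : d = '_'
        · rw [pvScan, pvScan]
          simp [hc1, hc2, hc3, hd1, hd2, hd3, pvCons, List.takeWhile, List.dropWhile, pvND, pvScan]
        · have hnd : pvND d = true := by simp [pvND, hd1, hd2, hd3]
          rw [pvScan, pvScan]
          simp [hc1, hc2, hc3, hd1, hd2, hd3, hnd, pvCons, List.takeWhile, List.dropWhile]

lemma loopA_acc (base : String) :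
    ∀ cs acc sign lang det, tokenize_sign_loopA base cs acc sign lang det
      = acc ++ tokenize_sign_loopA base cs [] sign lang det := by
  intro cs
  induction cs with
  | nil =>
    intro acc sign lang det
    simp only [tokenize_sign_loopA]
    split_ifs <;> simp
  | cons c rest ih =>
    intro acc sign lang det
    simp only [tokenize_sign_loopA]
    split_ifs <;> (conv_lhs => rw [ih]) <;> (conv_rhs => rw [ih]) <;> simp

lemma loopA_unknown (base lang : String) (h1 : lang ≠ "akkadian") (h2 : lang ≠ "sumerian") :
    ∀ cs acc, tokenize_sign_loopA base cs acc [] lang false = acc := by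
  intro cs
  induction cs with
  | nil => intro acc; simp [tokenize_sign_loopA]
  | cons c rest ih => intro acc; simp [tokenize_sign_loopA, h1, h2, ih]

lemma loopA_det (base : String) :
    ∀ cs sign lang, tokenize_sign_loopA base cs [] sign lang true
      = (match cs.dropWhile (· ≠ '}') with
         | [] => if sign ++ cs.takeWhile (· ≠ '}') = [] then []
                 else [(String.ofList (sign ++ cs.takeWhile (· ≠ '}')), lang)]
         | _ :: r' => (if sign ++ cs.takeWhile (· ≠ '}') = [] then []
                       else [(String.ofList (sign ++ cs.takeWhile (· ≠ '}')), "determinative")])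
                      ++ tokenize_sign_loopA base r' [] [] base false) := by
  intro cs
  induction cs with
  | nil => intro sign lang; simp only [tokenize_sign_loopA]; split_ifs <;> simp_all
  | cons c rest ih =>
    intro sign lang
    by_cases hc : c = '}'
    · subst hc
      simp only [tokenize_sign_loopA, if_pos rfl, if_true]
      rw [loopA_acc]
      have hdrop : List.dropWhile (fun x => x ≠ '}') ('}' :: rest) = '}' :: rest := by
        simp [List.dropWhile]
      have htake : List.takeWhile (fun x => x ≠ '}') ('}' :: rest) = [] := by
        simp [List.takeWhile]
      rw [hdrop, htake]
      split_ifs <;> simp_all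
    · simp only [tokenize_sign_loopA, if_neg hc, if_pos, if_true]
      rw [ih (sign ++ [c]) lang]
      have htake : List.takeWhile (fun x => x ≠ '}') (c :: rest)
          = c :: List.takeWhile (fun x => x ≠ '}') rest := by simp [List.takeWhile, hc]
      have hdrop : List.dropWhile (fun x => x ≠ '}') (c :: rest)
          = List.dropWhile (fun x => x ≠ '}') rest := by simp [List.dropWhile, hc]
      rw [htake, hdrop]
      cases List.dropWhile (fun x => x ≠ '}') rest <;> simp

lemma pvScan_brace_nil (rest : List Char) (h : rest.dropWhile (· ≠ '}') = []) :
    pvScan ('{' :: rest) = [PvTok.opn (rest.takeWhile (· ≠ '}'))] := by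
  rw [pvScan]
  simp only [reduceIte]
  split
  · rfl
  · next e r' heq => rw [h] at heq; simp at heq

lemma pvScan_brace_cons (rest : List Char) (e : Char) (r' : List Char)
    (h : rest.dropWhile (· ≠ '}') = e :: r') :
    pvScan ('{' :: rest) = PvTok.det (rest.takeWhile (· ≠ '}')) :: pvScan r' := by
  rw [pvScan]
  simp only [reduceIte]
  split
  · next heq => rw [h] at heq; simp at heq
  · next e2 r2 heq =>
      rw [h] at heq
      injection heq with h1 h2
      rw [h2]

set_option maxHeartbeats 2000000 in
lemma loopA_main (base : String) (hb : base = "akkadian" ∨ base = "sumerian") :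
    ∀ n cs, cs.length ≤ n → ∀ sign lang, (lang = base ∨ lang = "sumerian") →
      tokenize_sign_loopA base cs [] sign lang false
        = pvEmit base (pvCons sign (pvScan cs)) lang := by
  intro n
  induction n with
  | zero =>
    intro cs hcs sign lang _
    have hnil : cs = [] := by cases cs <;> simp_all
    subst hnil
    simp only [tokenize_sign_loopA, pvScan]
    cases sign <;> simp [pvCons, pvEmit]
  | succ n ih =>
    intro cs hcs sign lang hlang
    have hlang2 : lang = "akkadian" ∨ lang = "sumerian" := by
      rcases hb with h | h <;> rcases hlang with h' | h' <;> simp_all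
    cases cs with
    | nil =>
      simp only [tokenize_sign_loopA, pvScan]
      cases sign <;> simp [pvCons, pvEmit]
    | cons c rest =>
      have hrest : rest.length ≤ n := by simp at hcs; omega
      by_cases h1 : c = '{'
      · subst h1
        have hA : tokenize_sign_loopA base ('{' :: rest) [] sign lang false
            = (if sign = [] then [] else [(String.ofList sign, lang)])
              ++ tokenize_sign_loopA base rest [] [] lang true := by
          rcases hlang2 with h | h <;> subst h <;>
            simp only [tokenize_sign_loopA] <;> split_ifs <;>
            (try simp_all) <;> (rw [loopA_acc base rest] <;> simp_all)
        rw [hA, loopA_det]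
        cases h : List.dropWhile (fun x => decide (x ≠ '}')) rest with
        | nil =>
          rw [pvScan_brace_nil rest h]
          cases sign <;> simp [pvCons, pvEmit] <;>
            cases hte : List.takeWhile (fun x => decide (x ≠ '}')) rest <;> simp [pvEmit]
        | cons e r' =>
          rw [pvScan_brace_cons rest e r' h]
          have hr' : r'.length ≤ n := by
            have := List.length_dropWhile_le (p := (fun x => decide (x ≠ '}'))) (l := rest)
            rw [h] at this; simp at this; omega
          have hih := ih r' hr' [] base (Or.inl rfl)
          simp only [pvCons, if_pos rfl] at hih
          cases sign <;> simp [pvCons, pvEmit, hih] <;>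
            cases hte : List.takeWhile (fun x => decide (x ≠ '}')) rest <;> simp [pvEmit]
      · by_cases h2 : c = '-'
        · subst h2
          have hA : tokenize_sign_loopA base ('-' :: rest) [] sign lang false
              = (if sign = [] then [] else [(String.ofList sign, lang)])
                ++ tokenize_sign_loopA base rest [] [] base false := by
            rcases hlang2 with h | h <;> subst h <;>
              simp only [tokenize_sign_loopA] <;> split_ifs <;>
              (try simp_all) <;> (rw [loopA_acc base rest] <;> simp_all)
          rw [hA, ih rest hrest [] base (Or.inl rfl)]
          rw [pvScan]
          cases sign <;> simp [pvCons, pvEmit]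
        · by_cases h3 : c = '_'
          · subst h3
            have hA : tokenize_sign_loopA base ('_' :: rest) [] sign lang false
                = (if sign = [] then [] else [(String.ofList sign, lang)])
                  ++ tokenize_sign_loopA base rest [] []
                      (if lang = "akkadian" then "sumerian" else base) false := by
              rcases hlang2 with h | h <;> subst h <;>
                simp only [tokenize_sign_loopA] <;> split_ifs <;>
                (try simp_all) <;> (rw [loopA_acc base rest] <;> simp_all)
            have hvalid : (if lang = "akkadian" then "sumerian" else base) = base
                ∨ (if lang = "akkadian" then "sumerian" else base) = "sumerian" := by
              split_ifs <;> simp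
            rw [hA, ih rest hrest [] _ hvalid]
            rw [pvScan]
            simp only [if_neg h1, if_neg h2, if_pos rfl]
            cases sign <;> simp [pvCons, pvEmit]
          · have hnd : pvND c = true := by simp [pvND, h1, h2, h3]
            have hA : tokenize_sign_loopA base (c :: rest) [] sign lang false
                = tokenize_sign_loopA base rest [] (sign ++ [c]) lang false := by
              rcases hlang2 with h | h <;> subst h <;>
                simp only [tokenize_sign_loopA] <;> simp_all
            rw [hA, ih rest hrest (sign ++ [c]) lang hlang,
                pvScan_cons_nd c rest hnd, ← pvCons_append]

-- ===== VERDICT (by name: the statement is the Claim_ definition above) =====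
theorem tokenize_sign_spec : Claim_equal_tokenize_sign := by
  intro word _
  unfold Spec_tokenize_sign tokenize_sign tokenize_sign_alt
  by_cases hb : word.2 = "akkadian" ∨ word.2 = "sumerian"
  · have := loopA_main word.2 hb word.1.toList.length word.1.toList le_rfl [] word.2 (Or.inl rfl)
    simp [pvCons] at this
    rcases hb with h | h <;> simp [h] at this ⊢ <;> exact this
  · rw [not_or] at hb
    rw [loopA_unknown word.2 word.2 hb.1 hb.2 word.1.toList []]
    simp [hb.1, hb.2]
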